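-- pv_equiv track=rewrite | github.com/raeez/chiral-bar-cobar-vol2 | compute/tests/test_adversarial_verification.py | shifted_pochhammer_coeffs
-- ===== SOURCE A (Python) =====
-- def shifted_pochhammer_coeffs(r):
--     """Coefficients of (y+2)(y+3)...(y+2r+1) as list [a_0, ..., a_{2r}]."""
--     poly = [1]
--     for j in range(2, 2 * r + 2):
--         new_poly = [0] * (len(poly) + 1)
--         for i, c in enumerate(poly):
--             new_poly[i] += c * j
--             new_poly[i + 1] += c
--         poly = new_poly
--     return poly
-- ===== SOURCE B (Python) =====
-- def shifted_pochhammer_coeffs(r):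
--     """Coefficients of (y+2)(y+3)...(y+2r+1) as list [a_0, ..., a_{2r}]."""
--     factors = [[j, 1] for j in range(2, 2 * r + 2)]
--
--     def mul(p, q):
--         if not p:
--             return []
--         return [sum(p[i] * q[k - i] for i in range(len(p)) if 0 <= k - i < len(q))
--                 for k in range(len(p) + len(q) - 1)]
--
--     def prod(fs):
--         if not fs:
--             return [1]
--         if len(fs) == 1:
--             return fs[0]
--         m = len(fs) // 2
--         return mul(prod(fs[:m]), prod(fs[m:]))
--
--     return prod(factors)
-- ===== Notes on version B (the rewrite author's own statement) =====
-- stated objective: alternative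
-- what changed: Replaced the in-place coefficient-array update loop by a divide-and-conquer product: the linear factors [j,1] are collected as a list and multiplied by recursive halving, with pairs of partial products combined by a direct convolution comprehension.
import Mathlib
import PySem

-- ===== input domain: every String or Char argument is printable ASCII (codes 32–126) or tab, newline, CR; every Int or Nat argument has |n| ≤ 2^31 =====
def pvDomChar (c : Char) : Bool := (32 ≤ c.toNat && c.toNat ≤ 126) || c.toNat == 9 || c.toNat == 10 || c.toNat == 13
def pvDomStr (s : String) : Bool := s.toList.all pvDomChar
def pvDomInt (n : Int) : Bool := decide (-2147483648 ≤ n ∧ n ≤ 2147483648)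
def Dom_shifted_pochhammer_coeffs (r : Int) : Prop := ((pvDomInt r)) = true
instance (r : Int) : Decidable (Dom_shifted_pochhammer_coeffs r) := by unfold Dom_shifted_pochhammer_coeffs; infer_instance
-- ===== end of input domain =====

-- B replaces A's in-place coefficient-array update loop by a divide-and-conquer product of the
-- linear factors [j,1], combining partial products by a direct convolution (alternative, same cost).

-- ===== PORT A =====
def shifted_pochhammer_coeffs (r : Int) : List Int :=
  (PySem.List.pyRange 2 (2 * r + 2) 1).foldl
    (fun poly j =>
      (PySem.List.enumerate poly 0).foldl
        (fun np ic =>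
          let np1 := np.set ic.1.toNat (np.getD ic.1.toNat 0 + ic.2 * j)
          np1.set (ic.1.toNat + 1) (np1.getD (ic.1.toNat + 1) 0 + ic.2))
        (List.replicate (poly.length + 1) 0))
    [1]

-- ===== PORT B =====
-- helper mul(p, q): convolution by comprehension, one sum per output coefficient
def pvMulP (p q : List Int) : List Int :=
  if p = [] then []
  else (List.range (p.length + q.length - 1)).map (fun k =>
    (((List.range p.length).filter (fun i => decide (i ≤ k) && decide (k - i < q.length))).map
      (fun i => p.getD i 0 * q.getD (k - i) 0)).sum)

-- helper prod(fs): divide and conquer over the factor list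
def pvProdP : List (List Int) → List Int
  | [] => [1]
  | [f] => f
  | f :: g :: rest =>
      pvMulP (pvProdP ((f :: g :: rest).take ((f :: g :: rest).length / 2)))
             (pvProdP ((f :: g :: rest).drop ((f :: g :: rest).length / 2)))
termination_by fs => fs.length
decreasing_by
  · simp; omega
  · simp; omega

def shifted_pochhammer_coeffs_alt (r : Int) : List Int :=
  pvProdP ((PySem.List.pyRange 2 (2 * r + 2) 1).map (fun j => [j, 1]))

-- ===== PRECONDITION & SPEC =====
def Spec_shifted_pochhammer_coeffs (r : Int) (out : List Int) : Prop := out = shifted_pochhammer_coeffs_alt r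
instance (r : Int) (out : List Int) : Decidable (Spec_shifted_pochhammer_coeffs r out) := by unfold Spec_shifted_pochhammer_coeffs; infer_instance

-- ===== CLAIM (what is proved, stated in full; the proofs are below) =====
def Claim_equal_shifted_pochhammer_coeffs : Prop := ∀ (r : Int), Dom_shifted_pochhammer_coeffs r → Spec_shifted_pochhammer_coeffs r (shifted_pochhammer_coeffs r)

-- ===== LEMMAS AND PROOFS =====

-- recursive polynomial sum / product, the proofs' reference forms
def pvAddR : List Int → List Int → List Int
  | [], q => q
  | a :: p, [] => a :: p
  | a :: p, b :: q => (a + b) :: pvAddR p q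

def pvMulR : List Int → List Int → List Int
  | [], _ => []
  | a :: p, q => pvAddR (q.map (a * ·)) (0 :: pvMulR p q)

theorem pvAddR_nil_right (p : List Int) : pvAddR p [] = p := by
  cases p <;> rfl

theorem pvAddR_comm (p : List Int) : ∀ q, pvAddR p q = pvAddR q p := by
  induction p with
  | nil => intro q; cases q <;> rfl
  | cons a p ih => intro q; cases q <;> simp [pvAddR, ih, Int.add_comm]

theorem pvAddR_assoc (p : List Int) : ∀ q r, pvAddR (pvAddR p q) r = pvAddR p (pvAddR q r) := by
  induction p with
  | nil => intro q r; rfl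
  | cons a p ih =>
      intro q r
      cases q with
      | nil => rfl
      | cons b q => cases r <;> simp [pvAddR, ih, Int.add_assoc]

theorem pvAddR_interchange (a b c d : List Int) :
    pvAddR (pvAddR a b) (pvAddR c d) = pvAddR (pvAddR a c) (pvAddR b d) := by
  rw [pvAddR_assoc, ← pvAddR_assoc b c d, pvAddR_comm b c, pvAddR_assoc, ← pvAddR_assoc]

theorem map_pvAddR (f : Int → Int) (hf : ∀ x y, f (x + y) = f x + f y) (p : List Int) :
    ∀ q, (pvAddR p q).map f = pvAddR (p.map f) (q.map f) := by
  induction p with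
  | nil => intro q; rfl
  | cons a p ih => intro q; cases q <;> simp [pvAddR, ih, hf]

theorem pvMulR_cons_ne_nil (a : Int) (p q : List Int) : pvMulR (a :: p) q ≠ [] := by
  simp only [pvMulR]
  cases h : q.map (a * ·) <;> simp [pvAddR]

theorem pvMulR_one_right (p : List Int) : pvMulR p [1] = p := by
  induction p with
  | nil => rfl
  | cons a p ih => simp [pvMulR, ih, pvAddR]

theorem pvMulR_map_right (p : List Int) (c : Int) : ∀ q, pvMulR p (q.map (· * c)) = (pvMulR p q).map (· * c) := by
  induction p with
  | nil => intro q; rfl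
  | cons a p ih =>
      intro q
      simp only [pvMulR, ih]
      have h1 : (q.map (· * c)).map (a * ·) = (q.map (a * ·)).map (· * c) := by
        simp only [List.map_map]
        exact List.map_congr_left (fun x _ => by simp [Function.comp]; ring)
      rw [h1, map_pvAddR (· * c) (fun x y => by ring)]
      simp

theorem pvMulR_ne_nil (P q : List Int) (hP : P ≠ []) : pvMulR P q ≠ [] := by
  cases P with
  | nil => exact absurd rfl hP
  | cons a p => exact pvMulR_cons_ne_nil a p q

theorem pvMulR_zero_cons (b : Int) (q : List Int) : ∀ p : List Int, p ≠ [] →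
    pvMulR p (0 :: b :: q) = 0 :: pvMulR p (b :: q) := by
  intro p
  induction p with
  | nil => intro h; exact absurd rfl h
  | cons a p ih =>
      intro _
      cases p with
      | nil => simp [pvMulR, pvAddR, pvAddR_nil_right]
      | cons a' p' =>
          rw [show pvMulR (a :: a' :: p') (0 :: b :: q)
                = pvAddR ((0 :: b :: q).map (a * ·)) (0 :: pvMulR (a' :: p') (0 :: b :: q)) from rfl,
              ih (by simp),
              show pvMulR (a :: a' :: p') (b :: q)
                = pvAddR ((b :: q).map (a * ·)) (0 :: pvMulR (a' :: p') (b :: q)) from rfl]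
          simp [pvAddR]

theorem pvMulR_lin (j : Int) : ∀ p : List Int, p ≠ [] →
    pvMulR p [j, 1] = pvAddR (p.map (· * j)) (0 :: p) := by
  intro p
  induction p with
  | nil => intro h; exact absurd rfl h
  | cons a p ih =>
      intro _
      cases p with
      | nil => simp [pvMulR, pvAddR]
      | cons a' p' =>
          rw [show pvMulR (a :: a' :: p') [j, 1]
                = pvAddR ([j, 1].map (a * ·)) (0 :: pvMulR (a' :: p') [j, 1]) from rfl,
              ih (by simp)]
          simp [pvAddR, Int.add_comm]

theorem pvMulR_distrib (p : List Int) : ∀ x y, pvMulR p (pvAddR x y) = pvAddR (pvMulR p x) (pvMulR p y) := by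
  induction p with
  | nil => intro x y; rfl
  | cons a p ih =>
      intro x y
      simp only [pvMulR, ih, map_pvAddR (a * ·) (fun u v => by ring)]
      rw [show (0 : Int) :: pvAddR (pvMulR p x) (pvMulR p y)
            = pvAddR (0 :: pvMulR p x) (0 :: pvMulR p y) by simp [pvAddR]]
      exact pvAddR_interchange _ _ _ _

theorem pvMulR_lin_assoc (j : Int) (P Q : List Int) (hP : P ≠ []) (hQ : Q ≠ []) :
    pvMulR P (pvMulR Q [j, 1]) = pvMulR (pvMulR P Q) [j, 1] := by
  obtain ⟨b, q, rfl⟩ : ∃ b q, Q = b :: q := by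
    cases Q with
    | nil => exact absurd rfl hQ
    | cons b q => exact ⟨b, q, rfl⟩
  rw [pvMulR_lin j (b :: q) hQ, pvMulR_distrib,
      show (b :: q).map (· * j) = ((b :: q).map id).map (· * j) by simp,
      pvMulR_map_right, pvMulR_zero_cons b q P hP,
      pvMulR_lin j (pvMulR P (b :: q)) (pvMulR_ne_nil P (b :: q) hP)]
  simp

-- iterated multiplication by the linear factors, A's traversal order
def pvF (P : List Int) (js : List Int) : List Int := js.foldl (fun a j => pvMulR a [j, 1]) P

theorem pvF_ne_nil : ∀ (js : List Int) (P : List Int), P ≠ [] → pvF P js ≠ [] := by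
  intro js
  induction js with
  | nil => intro P hP; exact hP
  | cons j js ih => intro P hP; exact ih _ (pvMulR_ne_nil P [j, 1] hP)

theorem pvF_mul : ∀ (js : List Int) (P Q : List Int), P ≠ [] → Q ≠ [] →
    pvMulR P (pvF Q js) = pvF (pvMulR P Q) js := by
  intro js
  induction js with
  | nil => intro P Q _ _; rfl
  | cons j js ih =>
      intro P Q hP hQ
      show pvMulR P (pvF (pvMulR Q [j, 1]) js) = pvF (pvMulR (pvMulR P Q) [j, 1]) js
      rw [ih P _ hP (pvMulR_ne_nil Q [j, 1] hQ), pvMulR_lin_assoc j P Q hP hQ]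

-- ===== bridge: the port's comprehension convolution equals the recursive one =====

theorem pvAddR_getD (x : List Int) : ∀ (y : List Int) (k : Nat),
    (pvAddR x y).getD k 0 = x.getD k 0 + y.getD k 0 := by
  induction x with
  | nil => intro y k; simp [pvAddR]
  | cons a x ih =>
      intro y k
      cases y with
      | nil => simp [pvAddR]
      | cons b y => cases k with
        | zero => simp [pvAddR]
        | succ k => simpa [pvAddR] using ih y k

theorem pvAddR_length (x : List Int) : ∀ y, (pvAddR x y).length = max x.length y.length := by
  induction x with
  | nil => intro y; simp [pvAddR]
  | cons a x ih =>
      intro y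
      cases y with
      | nil => simp [pvAddR]
      | cons b y => simp [pvAddR, ih]

theorem pvMulR_length (q : List Int) (hq : q ≠ []) : ∀ p, p ≠ [] →
    (pvMulR p q).length = p.length + q.length - 1 := by
  intro p
  induction p with
  | nil => intro h; exact absurd rfl h
  | cons a p ih =>
      intro _
      have hq1 : 1 ≤ q.length := List.length_pos_iff.mpr hq
      cases p with
      | nil => simp [pvMulR, pvAddR_length]; omega
      | cons a' p' =>
          have := ih (by simp)
          simp only [pvMulR, pvAddR_length, List.length_map, List.length_cons] at *
          omega

theorem map_getD_range (f : Int → Int) : ∀ l : List Int,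
    (List.range l.length).map (fun k => f (l.getD k 0)) = l.map f := by
  intro l
  induction l with
  | nil => simp
  | cons a l ih =>
      rw [List.length_cons, List.range_succ_eq_map, List.map_cons, List.map_map]
      simpa using ih

theorem getD_map_zero (a : Int) (q : List Int) (k : Nat) :
    (q.map (a * ·)).getD k 0 = if k < q.length then a * q.getD k 0 else 0 := by
  by_cases h : k < q.length
  · simp [h, List.getD_eq_getElem?_getD, List.getElem?_eq_getElem, List.getElem_map]
  · simp [h, List.getD_eq_getElem?_getD, List.getElem?_eq_none_iff.mpr (by simpa using Nat.le_of_not_lt h)]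

theorem pvMulP_eq_R (q : List Int) (hq : q ≠ []) : ∀ p, pvMulP p q = pvMulR p q := by
  have hq1 : 1 ≤ q.length := List.length_pos_iff.mpr hq
  intro p
  induction p with
  | nil => simp [pvMulP, pvMulR]
  | cons a p ih =>
      cases p with
      | nil =>
          obtain ⟨b, t, rfl⟩ : ∃ b t, q = b :: t := by
            cases q with
            | nil => exact absurd rfl hq
            | cons b t => exact ⟨b, t, rfl⟩
          simp only [pvMulP, if_neg (by simp : ¬([a] : List Int) = [])]
          rw [show [a].length + (b :: t).length - 1 = (b :: t).length by simp]
          have hcong : (List.range (b :: t).length).map (fun k =>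
              (((List.range [a].length).filter (fun i => decide (i ≤ k) && decide (k - i < (b :: t).length))).map
                (fun i => [a].getD i 0 * (b :: t).getD (k - i) 0)).sum)
              = (List.range (b :: t).length).map (fun k => a * (b :: t).getD k 0) := by
            apply List.map_congr_left
            intro k hk
            rw [List.mem_range] at hk
            have hk' : k ≤ t.length := by simpa [Nat.lt_succ_iff] using hk
            simp [List.filter, hk']
          rw [hcong, map_getD_range (fun x => a * x) (b :: t)]
          simp [pvMulR, pvAddR, pvAddR_nil_right]
      | cons a' p' =>
          set P := a' :: p' with hP
          have hPne : P ≠ [] := by simp [hP]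
          have hlenR : (pvMulR (a :: P) q).length = P.length + q.length := by
            rw [pvMulR_length q hq (a :: P) (by simp)]; simp
          have hlenL : (pvMulP (a :: P) q).length = P.length + q.length := by
            simp only [pvMulP, if_neg (by simp : ¬(a :: P) = [])]
            simp
          apply List.ext_getElem (by rw [hlenL, hlenR])
          intro K h1 h2
          have hK : K < P.length + q.length := by rwa [hlenL] at h1
          have hL : (pvMulP (a :: P) q)[K] =
              (if K < q.length then a * q.getD K 0 else 0) +
              (((List.range P.length).filter (fun i => decide (i + 1 ≤ K) && decide (K - 1 - i < q.length))).map
                (fun i => P.getD i 0 * q.getD (K - 1 - i) 0)).sum := by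
            simp only [pvMulP, if_neg (by simp : ¬(a :: P) = [])]
            rw [List.getElem_map, List.getElem_range]
            rw [show (a :: P).length = P.length + 1 from by simp, List.range_succ_eq_map]
            rw [List.filter_cons]
            have hguard0 : (decide ((0 : Nat) ≤ K) && decide (K - 0 < q.length)) = decide (K < q.length) := by
              simp
            rw [hguard0]
            simp only [decide_eq_true_eq]
            have htail : (List.map (fun i => (a :: P).getD i 0 * q.getD (K - i) 0)
                (((List.range P.length).map (fun i => i + 1)).filter
                  (fun i => decide (i ≤ K) && decide (K - i < q.length)))).sum
                = (((List.range P.length).filter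
                      (fun i => decide (i + 1 ≤ K) && decide (K - 1 - i < q.length))).map
                    (fun i => P.getD i 0 * q.getD (K - 1 - i) 0)).sum := by
              rw [List.filter_map, List.map_map]
              simp only [Function.comp_def, List.getD_cons_succ,
                show ∀ i : Nat, K - 1 - i = K - (i + 1) from fun i => by omega]
            split_ifs with hKq
            · rw [List.map_cons, List.sum_cons, htail]
              simp
            · rw [htail]
              simp
          have hR : (pvMulR (a :: P) q)[K] =
              (if K < q.length then a * q.getD K 0 else 0) + (0 :: pvMulR P q).getD K 0 := by
            rw [show (pvMulR (a :: P) q)[K] = (pvMulR (a :: P) q).getD K 0 from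
                  (List.getD_eq_getElem _ 0 h2).symm,
                show pvMulR (a :: P) q = pvAddR (q.map (a * ·)) (0 :: pvMulR P q) from rfl,
                pvAddR_getD, getD_map_zero]
          rw [hL, hR]
          congr 1
          cases K with
          | zero =>
              simp
          | succ K =>
              rw [List.getD_cons_succ, ← ih]
              have hKlt : K < P.length + q.length - 1 := by omega
              have hgetD : (pvMulP P q).getD K 0 =
                  (((List.range P.length).filter (fun i => decide (i ≤ K) && decide (K - i < q.length))).map
                    (fun i => P.getD i 0 * q.getD (K - i) 0)).sum := by
                simp only [pvMulP, if_neg hPne]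
                rw [List.getD_eq_getElem _ 0 (by simpa using hKlt), List.getElem_map,
                    List.getElem_range]
              rw [hgetD]
              have hfc : List.filter (fun i => decide (i + 1 ≤ K + 1) && decide (K + 1 - 1 - i < q.length))
                    (List.range P.length)
                  = List.filter (fun i => decide (i ≤ K) && decide (K - i < q.length)) (List.range P.length) :=
                List.filter_congr (fun i _ => by
                  have e1 : K + 1 - 1 - i = K - i := by omega
                  have e2 : (i + 1 ≤ K + 1) ↔ (i ≤ K) := by omega
                  simp [e2])
              rw [hfc]
              apply congrArg
              apply List.map_congr_left
              intro i _
              have e1 : K + 1 - 1 - i = K - i := by omega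
              rw [e1]

theorem pvProdP_map : ∀ (n : Nat) (js : List Int), js.length ≤ n →
    pvProdP (js.map (fun j => [j, 1])) = pvF [1] js := by
  intro n
  induction n with
  | zero =>
      intro js h
      rw [List.length_eq_zero_iff.mp (Nat.le_zero.mp h)]
      simp [pvProdP, pvF]
  | succ n ih =>
      intro js h
      match js with
      | [] => simp [pvProdP, pvF]
      | [j] => simp [pvProdP, pvF, pvMulR, pvAddR]
      | j :: k :: rest =>
          set js := j :: k :: rest with hjs
          have hlen : 2 ≤ js.length := by simp [hjs]
          set m := js.length / 2 with hm
          have hm1 : 1 ≤ m := by omega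
          have hmlt : m < js.length := by omega
          have hmap : js.map (fun j => [j, 1]) = [j, 1] :: [k, 1] :: rest.map (fun j => [j, 1]) := by
            simp [hjs]
          have hlen2 : ([j, 1] :: [k, 1] :: rest.map (fun j => [j, 1])).length = js.length := by
            simp [hjs]
          have heq : pvProdP (js.map (fun j => [j, 1]))
              = pvMulP (pvProdP ((js.take m).map (fun j => [j, 1])))
                       (pvProdP ((js.drop m).map (fun j => [j, 1]))) := by
            rw [hmap, pvProdP, hlen2, ← hm, ← hmap, List.map_take, List.map_drop]
          rw [heq, ih (js.take m) (by simp; omega), ih (js.drop m) (by simp; omega)]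
          rw [pvMulP_eq_R _ (pvF_ne_nil (js.drop m) [1] (by simp)) _]
          rw [pvF_mul (js.drop m) _ [1] (pvF_ne_nil _ [1] (by simp)) (by simp),
              pvMulR_one_right]
          unfold pvF
          rw [← List.foldl_append, List.take_append_drop]

-- ===== A-side: the in-place update loop is multiplication by [j, 1] =====

-- the state of A's inner loop after consuming a prefix of poly
def pvRun (j : Int) : List Int → List Int → List Int
  | [], r => r
  | c :: p, r0 :: r1 :: rs => (r0 + c * j) :: pvRun j p ((r1 + c) :: rs)
  | _ :: _, r => r

theorem pvFoldA_run (j : Int) : ∀ (p pre r : List Int), r.length = p.length + 1 →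
    (PySem.List.enumerate p (pre.length : Int)).foldl
      (fun np ic =>
        let np1 := np.set ic.1.toNat (np.getD ic.1.toNat 0 + ic.2 * j)
        np1.set (ic.1.toNat + 1) (np1.getD (ic.1.toNat + 1) 0 + ic.2)) (pre ++ r)
    = pre ++ pvRun j p r := by
  intro p
  induction p with
  | nil =>
      intro pre r _
      simp [PySem.List.enumerate_nil, pvRun]
  | cons c p ih =>
      intro pre r hr
      obtain ⟨r0, r1, rs, rfl⟩ : ∃ r0 r1 rs, r = r0 :: r1 :: rs := by
        match r, hr with
        | r0 :: r1 :: rs, _ => exact ⟨r0, r1, rs, rfl⟩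
      simp only [PySem.List.enumerate_cons, List.foldl_cons, Int.toNat_natCast]
      have h2 : (pre ++ r0 :: r1 :: rs).set pre.length
            ((pre ++ r0 :: r1 :: rs).getD pre.length 0 + c * j)
          = (pre ++ [r0 + c * j]) ++ r1 :: rs := by simp
      rw [h2]
      have h4 : ((pre ++ [r0 + c * j]) ++ r1 :: rs).set (pre.length + 1)
            (((pre ++ [r0 + c * j]) ++ r1 :: rs).getD (pre.length + 1) 0 + c)
          = (pre ++ [r0 + c * j]) ++ (r1 + c) :: rs := by
        have hlen : (pre ++ [r0 + c * j]).length = pre.length + 1 := by simp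
        rw [← hlen]; simp
      rw [h4]
      have hs : (pre.length : Int) + 1 = ((pre ++ [r0 + c * j]).length : Int) := by simp
      rw [hs, ih (pre ++ [r0 + c * j]) ((r1 + c) :: rs) (by simpa using hr)]
      simp [pvRun]

theorem pvRun_eq (j : Int) : ∀ (p : List Int) (x : Int),
    pvRun j p (x :: List.replicate p.length 0) = pvAddR [x] (pvMulR p [j, 1]) := by
  intro p
  induction p with
  | nil => intro x; simp [pvRun, pvMulR, pvAddR]
  | cons c p ih =>
      intro x
      simp only [List.length_cons, List.replicate_succ, pvRun]
      rw [Int.zero_add, ih c]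
      simp [pvMulR, pvAddR]

theorem pvStepA_eq (j : Int) (p : List Int) (hp : p ≠ []) :
    (PySem.List.enumerate p 0).foldl
      (fun np ic =>
        let np1 := np.set ic.1.toNat (np.getD ic.1.toNat 0 + ic.2 * j)
        np1.set (ic.1.toNat + 1) (np1.getD (ic.1.toNat + 1) 0 + ic.2))
      (List.replicate (p.length + 1) 0)
    = pvMulR p [j, 1] := by
  have h := pvFoldA_run j p [] (List.replicate (p.length + 1) 0) (by simp)
  simp only [List.nil_append, List.length_nil, Nat.cast_zero] at h
  rw [h, List.replicate_succ, pvRun_eq]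
  obtain ⟨m, M, hM⟩ : ∃ m M, pvMulR p [j, 1] = m :: M := by
    cases hPQ : pvMulR p [j, 1] with
    | nil => exact absurd hPQ (pvMulR_ne_nil p [j, 1] hp)
    | cons m M => exact ⟨m, M, rfl⟩
  rw [hM]
  simp [pvAddR]

theorem pvA_eq_F : ∀ (js acc : List Int), acc ≠ [] →
    js.foldl
      (fun poly j =>
        (PySem.List.enumerate poly 0).foldl
          (fun np ic =>
            let np1 := np.set ic.1.toNat (np.getD ic.1.toNat 0 + ic.2 * j)
            np1.set (ic.1.toNat + 1) (np1.getD (ic.1.toNat + 1) 0 + ic.2))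
          (List.replicate (poly.length + 1) 0)) acc
    = pvF acc js := by
  intro js
  induction js with
  | nil => intro acc _; rfl
  | cons j js ih =>
      intro acc hacc
      rw [List.foldl_cons, pvStepA_eq j acc hacc]
      exact ih _ (pvMulR_ne_nil acc [j, 1] hacc)

-- ===== VERDICT (by name: the statement is the Claim_ definition above) =====
theorem shifted_pochhammer_coeffs_spec : Claim_equal_shifted_pochhammer_coeffs := by
  intro r _
  unfold Spec_shifted_pochhammer_coeffs shifted_pochhammer_coeffs shifted_pochhammer_coeffs_alt
  rw [pvA_eq_F _ [1] (by simp),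
      pvProdP_map (PySem.List.pyRange 2 (2 * r + 2) 1).length _ (le_refl _)]
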